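-- pv_equiv track=rewrite | github.com/MarkSon-42/Team_ALGO | minwoo/신고 결과 받기(solved).py | solution
-- ===== SOURCE A (Python) =====
-- def solution(id_list, report, k):
--     # 딕셔너리를 2개 생성. 0으로 초기화. id_list의 각 요소를 key로 사용
--     id = {i:0 for i in id_list}  #
--     mail = {i:0 for i in id_list}  # 해당 사용자에게 보내진 메일의 횟수를 담을 예정
--
--     report = list(set(report))  # 신고 리스트에서 중복 제거후 다시 리스트로 변환
--
--     r = []  # 신고 내용을 임시로 저장할 용도의 빈 리스트 생성
--
--     for v in report:  # report 리스트를 반복하면서 각 신고 내용을 처리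
--         value = v.split(' ')
--         id[value[1]] += 1
--         r.append(value)
--
--     for i in r:  # r 리스트를 반복하면서 메일을 보내야 할 사용자들을 판별
--         if id[i[1]] >= k:
--             mail[i[0]] += 1
--
--     return list(mail.values())
-- ===== SOURCE B (Python) =====
-- def solution(id_list, report, k):
--     pairs = [v.split(' ') for v in set(report)]
--     times = {}
--     for p in pairs:
--         times[p[1]] = times.get(p[1], 0) + 1
--     return [sum(1 for p in pairs if p[0] == i and times[p[1]] >= k)
--             for i in dict.fromkeys(id_list)]
-- ===== Notes on version B (the rewrite author's own statement) =====
-- stated objective: simpler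
-- what changed: B replaces A's two pre-seeded mutable dicts and the increment-mail pass by one victim-count dict plus a per-user counting comprehension over the deduplicated reports, reading the answer off directly for each distinct id.
import Mathlib
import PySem

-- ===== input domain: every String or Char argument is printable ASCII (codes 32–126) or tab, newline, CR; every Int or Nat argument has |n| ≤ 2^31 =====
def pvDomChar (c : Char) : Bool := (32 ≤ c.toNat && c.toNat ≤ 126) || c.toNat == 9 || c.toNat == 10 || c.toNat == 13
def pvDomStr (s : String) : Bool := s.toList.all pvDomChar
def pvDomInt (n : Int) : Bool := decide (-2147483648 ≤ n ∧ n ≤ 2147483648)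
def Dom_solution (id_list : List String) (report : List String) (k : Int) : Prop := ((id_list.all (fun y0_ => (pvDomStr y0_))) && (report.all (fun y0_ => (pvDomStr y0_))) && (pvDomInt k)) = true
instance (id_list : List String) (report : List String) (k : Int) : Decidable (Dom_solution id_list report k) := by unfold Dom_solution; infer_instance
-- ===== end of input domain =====

-- B replaces A's two pre-seeded mutable dicts and mail-increment pass by one victim-count
-- dict plus a per-user counting comprehension over the deduplicated reports (simpler).

-- ===== PORT A =====
-- v.split(' '): the separator is nonempty, so split? is always `some`
def pvSplit (v : String) : List String := (PySem.Str.split? v " ").getD []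

-- d[key] += 1  (Python raises KeyError when key is absent; those inputs are excluded
-- by Pre_; here the dict is returned unchanged)
def pvInc (d : PySem.Dict String Int) (key : String) : PySem.Dict String Int :=
  match d.get? key with
  | some n => d.insert key (n + 1)
  | none   => d

-- {i: 0 for i in xs}
def pvZeroDict (xs : List String) : PySem.Dict String Int :=
  xs.foldl (fun d i => d.insert i 0) PySem.Dict.empty

-- loop body of `for v in report: value = v.split(' '); id[value[1]] += 1; r.append(value)`
def pvBody1 (st : PySem.Dict String Int × List (List String)) (v : String) :
    PySem.Dict String Int × List (List String) :=
  let value := pvSplit v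
  match PySem.List.pyGet? value 1 with
  | some key => (pvInc st.1 key, st.2 ++ [value])
  | none     => st      -- IndexError in Python; excluded by Pre_

-- loop body of `for i in r: if id[i[1]] >= k: mail[i[0]] += 1`
def pvBody2 (idd : PySem.Dict String Int) (k : Int) (m : PySem.Dict String Int)
    (i : List String) : PySem.Dict String Int :=
  match PySem.List.pyGet? i 1 with
  | some vkey =>
    match idd.get? vkey with
    | some c =>
      if k ≤ c then
        match PySem.List.pyGet? i 0 with
        | some rkey => pvInc m rkey
        | none      => m
      else m
    | none => m          -- KeyError in Python; excluded by Pre_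
  | none => m
def solution (id_list : List String) (report : List String) (k : Int) : List Int :=
  let idd := pvZeroDict id_list
  let mail := pvZeroDict id_list
  -- report = list(set(report)); every later use is independent of the set's iteration order
  let rep : List String := PySem.Set.ofList report
  let st := rep.foldl pvBody1 (idd, [])
  let mail := st.2.foldl (pvBody2 st.1 k) mail
  mail.values

-- ===== PORT B =====
-- p[n] for a piece list produced by split(' '); exact under Pre_ (index in range there)
def pvPiece (p : List String) (n : Int) : String := (PySem.List.pyGet? p n).getD ""

def solution_alt (id_list : List String) (report : List String) (k : Int) : List Int :=
  -- pairs = [v.split(' ') for v in set(report)]  (only consumed order-independently)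
  let pairs := (PySem.Set.ofList report).map pvSplit
  -- times[p[1]] = times.get(p[1], 0) + 1
  let times := pairs.foldl
      (fun d p => d.insert (pvPiece p 1) (d.getD (pvPiece p 1) 0 + 1))
      (PySem.Dict.empty : PySem.Dict String Int)
  -- [sum(1 for p in pairs if p[0] == i and times[p[1]] >= k) for i in dict.fromkeys(id_list)]
  (PySem.List.dedup id_list).map (fun i =>
    pairs.foldl (fun acc p =>
      if pvPiece p 0 == i && decide (k ≤ times.getD (pvPiece p 1) 0) then acc + 1 else acc)
      (0 : Int))

-- ===== PRECONDITION & SPEC =====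
-- Pre_ is exactly the set of inputs on which A returns: every report line must split into at
-- least two pieces (else IndexError), its victim must be a registered id (else KeyError in the
-- counting loop), and whenever a victim gathers at least k distinct report lines the reporters
-- on those lines must be registered ids too (else KeyError in the mail loop).
def Pre_solution (id_list : List String) (report : List String) (k : Int) : Prop :=
  ∀ v ∈ report,
    2 ≤ (pvSplit v).length ∧
    pvPiece (pvSplit v) 1 ∈ id_list ∧
    (k ≤ ((PySem.List.dedup report).countP
            (fun w => pvPiece (pvSplit w) 1 == pvPiece (pvSplit v) 1) : Int) →
      pvPiece (pvSplit v) 0 ∈ id_list)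
instance (id_list : List String) (report : List String) (k : Int) : Decidable (Pre_solution id_list report k) := by unfold Pre_solution; infer_instance

def pvWitness_solution : List String × List String × Int :=
  (["muzi", "frodo", "apeach", "neo"],
   ["muzi frodo", "apeach frodo", "frodo neo", "muzi neo", "apeach muzi"], 2)

def Spec_solution (id_list : List String) (report : List String) (k : Int) (out : List Int) : Prop := out = solution_alt id_list report k
instance (id_list : List String) (report : List String) (k : Int) (out : List Int) : Decidable (Spec_solution id_list report k out) := by unfold Spec_solution; infer_instance

-- ===== CLAIM (what is proved, stated in full; the proofs are below) =====
def Claim_equal_solution : Prop := ∀ (id_list : List String) (report : List String) (k : Int), Dom_solution id_list report k → Pre_solution id_list report k → Spec_solution id_list report k (solution id_list report k)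

-- ===== LEMMAS AND PROOFS =====

-- the victim (piece 1) and the reporter (piece 0) of a report line
def pvVK (v : String) : String := pvPiece (pvSplit v) 1
def pvRK (v : String) : String := pvPiece (pvSplit v) 0

lemma pvVK_def (v : String) : pvPiece (pvSplit v) 1 = pvVK v := rfl
lemma pvRK_def (v : String) : pvPiece (pvSplit v) 0 = pvRK v := rfl

-- number of distinct report lines against the victim of line v
def pvCnt (report : List String) (v : String) : Int :=
  (List.count (pvVK v) ((PySem.Set.ofList report).map pvVK) : Int)

-- the condition under which line v generates a mail
def pvHot (report : List String) (k : Int) (v : String) : Bool :=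
  decide (k ≤ pvCnt report v)

lemma pvPiece_spec (p : List String) (n : Nat) (h : n < p.length) :
    PySem.List.pyGet? p (n : Int) = some (pvPiece p (n : Int)) := by
  rw [PySem.List.pyGet?_natCast]
  simp [pvPiece, h]

lemma pyGet?_split_one (v : String) (h : 2 ≤ (pvSplit v).length) :
    PySem.List.pyGet? (pvSplit v) 1 = some (pvVK v) := by
  have := pvPiece_spec (pvSplit v) 1 (by omega)
  simpa [pvVK] using this

lemma pyGet?_split_zero (v : String) (h : 2 ≤ (pvSplit v).length) :
    PySem.List.pyGet? (pvSplit v) 0 = some (pvRK v) := by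
  have := pvPiece_spec (pvSplit v) 0 (by omega)
  simpa [pvRK] using this

lemma get?_foldl_zero (xs : List String) (u : String) (d : PySem.Dict String Int) :
    (xs.foldl (fun d i => d.insert i 0) d).get? u = if u ∈ xs then some 0 else d.get? u := by
  induction xs generalizing d with
  | nil => simp
  | cons x t ih =>
    rw [List.foldl_cons, ih, PySem.Dict.get?_insert]
    by_cases h1 : u ∈ t
    · simp [h1]
    · by_cases h2 : u = x <;> simp [h1, h2]

lemma get?_pvZeroDict (xs : List String) (u : String) :
    (pvZeroDict xs).get? u = if u ∈ xs then some 0 else none := by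
  rw [pvZeroDict, get?_foldl_zero, PySem.Dict.get?_empty]

lemma getD_pvZeroDict (xs : List String) (u : String) : (pvZeroDict xs).getD u 0 = 0 := by
  rw [PySem.Dict.getD_eq_get?_getD, get?_pvZeroDict]
  by_cases h : u ∈ xs <;> simp [h]

lemma keys_pvZeroDict (xs : List String) : (pvZeroDict xs).keys = PySem.Set.ofList xs := by
  rw [pvZeroDict, PySem.Dict.keys_foldl_insert, PySem.Dict.keys_empty, PySem.Set.update_nil_left]

lemma isSome_get?_insert (d : PySem.Dict String Int) (x u : String) (w : Int)
    (h : (d.get? u).isSome) : ((d.insert x w).get? u).isSome := by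
  rw [PySem.Dict.get?_insert]
  split_ifs <;> simp [h]

lemma get?_eq_some_getD (d : PySem.Dict String Int) (u : String)
    (h : (d.get? u).isSome) : d.get? u = some (d.getD u 0) := by
  rw [PySem.Dict.getD_eq_get?_getD]
  cases hh : d.get? u with
  | none => rw [hh] at h; simp at h
  | some n => simp

lemma pvInc_eq_insert (d : PySem.Dict String Int) (key : String)
    (h : (d.get? key).isSome) : pvInc d key = d.insert key (d.getD key 0 + 1) := by
  unfold pvInc
  cases hh : d.get? key with
  | none => rw [hh] at h; simp at h
  | some n => simp [PySem.Dict.getD_eq_get?_getD, hh]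

-- getD after a keyed counting loop
lemma getD_foldl_insert_key (l : List String) (f : String → String)
    (d : PySem.Dict String Int) (u : String) :
    (l.foldl (fun d v => d.insert (f v) (d.getD (f v) 0 + 1)) d).getD u 0
      = d.getD u 0 + (List.count u (l.map f) : Int) := by
  induction l generalizing d with
  | nil => simp
  | cons v t ih =>
    rw [List.foldl_cons, ih, List.map_cons, List.count_cons]
    rw [PySem.Dict.getD_insert]
    by_cases hu : u = f v
    · subst hu
      simp only [beq_self_eq_true, if_true]
      push_cast
      ring
    · simp [hu, Ne.symm hu]

lemma isSome_foldl_insert_key (l : List String) (f : String → String)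
    (d : PySem.Dict String Int) (u : String) (h : (d.get? u).isSome) :
    ((l.foldl (fun d v => d.insert (f v) (d.getD (f v) 0 + 1)) d).get? u).isSome := by
  induction l generalizing d with
  | nil => simpa
  | cons v t ih => exact ih _ (isSome_get?_insert _ _ _ _ h)

-- A's first loop: the count dict and the list r of split lines
lemma loop1_eq (l : List String) (d : PySem.Dict String Int) (r : List (List String))
    (hlen : ∀ v ∈ l, 2 ≤ (pvSplit v).length) :
    l.foldl pvBody1 (d, r)
      = (l.foldl (fun d v => pvInc d (pvVK v)) d, r ++ l.map pvSplit) := by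
  induction l generalizing d r with
  | nil => simp
  | cons v t ih =>
    rw [List.foldl_cons, List.foldl_cons]
    have h2 := hlen v (by simp)
    rw [show pvBody1 (d, r) v = (pvInc d (pvVK v), r ++ [pvSplit v]) by
      simp [pvBody1, pyGet?_split_one v h2]]
    rw [ih _ _ (fun w hw => hlen w (by simp [hw]))]
    simp

-- the pvInc counting loop is the keyed insert loop once every key is present
lemma foldl_pvInc_eq (l : List String) (d : PySem.Dict String Int)
    (hsome : ∀ v ∈ l, ((d.get? (pvVK v)).isSome)) :
    l.foldl (fun d v => pvInc d (pvVK v)) d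
      = l.foldl (fun d v => d.insert (pvVK v) (d.getD (pvVK v) 0 + 1)) d := by
  induction l generalizing d with
  | nil => rfl
  | cons v t ih =>
    rw [List.foldl_cons, List.foldl_cons, pvInc_eq_insert _ _ (hsome v (by simp))]
    exact ih _ (fun w hw => isSome_get?_insert _ _ _ _ (hsome w (by simp [hw])))

-- A's second loop over r: a conditional keyed counting loop
lemma loop2_eq (k : Int) (l : List String) (idd m : PySem.Dict String Int)
    (hlen : ∀ v ∈ l, 2 ≤ (pvSplit v).length)
    (hsome : ∀ v ∈ l, ((idd.get? (pvVK v)).isSome))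
    (hmail : ∀ v ∈ l, k ≤ idd.getD (pvVK v) 0 → (m.get? (pvRK v)).isSome) :
    (l.map pvSplit).foldl (pvBody2 idd k) m
      = (l.filter (fun v => decide (k ≤ idd.getD (pvVK v) 0))).foldl
          (fun m v => m.insert (pvRK v) (m.getD (pvRK v) 0 + 1)) m := by
  induction l generalizing m with
  | nil => rfl
  | cons v t ih =>
    have h2 := hlen v (by simp)
    rw [List.map_cons, List.foldl_cons, List.filter_cons]
    have hstep : pvBody2 idd k m (pvSplit v) =
        if k ≤ idd.getD (pvVK v) 0 then m.insert (pvRK v) (m.getD (pvRK v) 0 + 1) else m := by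
      simp only [pvBody2, pyGet?_split_one v h2, pyGet?_split_zero v h2,
        get?_eq_some_getD idd (pvVK v) (hsome v (by simp))]
      by_cases hk : k ≤ idd.getD (pvVK v) 0
      · simp only [if_pos hk]
        exact pvInc_eq_insert _ _ (hmail v (by simp) hk)
      · simp only [if_neg hk]
    by_cases hk : k ≤ idd.getD (pvVK v) 0
    · simp only [if_pos hk] at hstep
      simp only [hk, decide_true, if_true, List.foldl_cons]
      rw [hstep]
      exact ih (m.insert (pvRK v) (m.getD (pvRK v) 0 + 1))
        (fun w hw => hlen w (List.mem_cons_of_mem _ hw))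
        (fun w hw => hsome w (List.mem_cons_of_mem _ hw))
        (fun w hw hkw => isSome_get?_insert _ _ _ _ (hmail w (List.mem_cons_of_mem _ hw) hkw))
    · simp only [if_neg hk] at hstep
      simp only [hk, decide_false]
      rw [hstep]
      exact ih m
        (fun w hw => hlen w (List.mem_cons_of_mem _ hw))
        (fun w hw => hsome w (List.mem_cons_of_mem _ hw))
        (fun w hw hkw => hmail w (List.mem_cons_of_mem _ hw) hkw)

-- keys after a keyed counting loop whose keys are already present
lemma keys_foldl_insert_sub (l : List String) (f : String → String)
    (d : PySem.Dict String Int) (h : ∀ v ∈ l, f v ∈ d.keys) :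
    (l.foldl (fun d v => d.insert (f v) (d.getD (f v) 0 + 1)) d).keys = d.keys := by
  rw [PySem.Dict.keys_foldl_insert_key, PySem.Set.update_eq_append_filter]
  have hfil : (List.filter (fun y => !PySem.Set.contains d.keys y)
      (PySem.Set.ofList (l.map f))) = [] := by
    rw [List.filter_eq_nil_iff]
    intro y hy
    rw [PySem.Set.mem_ofList] at hy
    obtain ⟨v, hv, rfl⟩ := List.mem_map.mp hy
    simp [PySem.Set.contains, h v hv]
  rw [hfil, List.append_nil]

lemma count_map_eq_countP (l : List String) (f : String → String) (x : String) :
    List.count x (l.map f) = l.countP (fun v => f v == x) := by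
  rw [List.count_eq_countP, List.countP_map]
  rfl

-- characterization of Port A under Pre_
lemma A_eq (id_list report : List String) (k : Int)
    (hlen : ∀ v ∈ PySem.Set.ofList report, 2 ≤ (pvSplit v).length)
    (hvk : ∀ v ∈ PySem.Set.ofList report, pvVK v ∈ id_list)
    (hrk : ∀ v ∈ PySem.Set.ofList report, pvHot report k v = true → pvRK v ∈ id_list) :
    solution id_list report k
      = (PySem.Set.ofList id_list).map (fun u =>
          (List.count u (((PySem.Set.ofList report).filter (pvHot report k)).map pvRK) : Int)) := by
  have hsome0 : ∀ v ∈ PySem.Set.ofList report, (((pvZeroDict id_list).get? (pvVK v)).isSome) := by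
    intro v hv
    rw [get?_pvZeroDict]
    simp [hvk v hv]
  simp only [solution]
  rw [loop1_eq _ _ _ hlen]
  simp only [List.nil_append]
  rw [foldl_pvInc_eq _ _ hsome0]
  set C := (PySem.Set.ofList report).foldl
      (fun d v => d.insert (pvVK v) (d.getD (pvVK v) 0 + 1)) (pvZeroDict id_list) with hC
  have hCgetD : ∀ v ∈ PySem.Set.ofList report, C.getD (pvVK v) 0 = pvCnt report v := by
    intro v hv
    rw [hC, getD_foldl_insert_key, getD_pvZeroDict, pvCnt, zero_add]
  have hCsome : ∀ v ∈ PySem.Set.ofList report, ((C.get? (pvVK v)).isSome) := by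
    intro v hv
    exact isSome_foldl_insert_key _ _ _ _ (hsome0 v hv)
  have hmail : ∀ v ∈ PySem.Set.ofList report, k ≤ C.getD (pvVK v) 0 →
      (((pvZeroDict id_list).get? (pvRK v)).isSome) := by
    intro v hv hk
    rw [get?_pvZeroDict]
    have hhot : pvHot report k v = true := by
      rw [pvHot, hCgetD v hv] at *
      exact decide_eq_true hk
    simp [hrk v hv hhot]
  rw [loop2_eq k (PySem.Set.ofList report) C (pvZeroDict id_list) hlen hCsome hmail]
  have hfilter : List.filter (fun v => decide (k ≤ C.getD (pvVK v) 0)) (PySem.Set.ofList report)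
      = List.filter (pvHot report k) (PySem.Set.ofList report) := by
    apply List.filter_congr
    intro v hv
    rw [hCgetD v hv, pvHot]
  rw [hfilter]
  have hsub : ∀ v ∈ List.filter (pvHot report k) (PySem.Set.ofList report),
      pvRK v ∈ (pvZeroDict id_list).keys := by
    intro v hv
    rw [keys_pvZeroDict, PySem.Set.mem_ofList]
    exact hrk v (List.mem_of_mem_filter hv) (List.of_mem_filter hv)
  have hkeys := keys_foldl_insert_sub _ pvRK (pvZeroDict id_list) hsub
  rw [PySem.Dict.values_eq_map_keys _
    (by rw [hkeys, keys_pvZeroDict]; exact PySem.Set.nodup_ofList id_list) 0]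
  rw [hkeys, keys_pvZeroDict]
  apply List.map_congr_left
  intro u hu
  rw [getD_foldl_insert_key, getD_pvZeroDict, zero_add]

-- B's sum(1 for …) loop counts the lines satisfying its condition
lemma pvFoldlCount (l : List String) (p q : String → Bool) (h : ∀ v ∈ l, p v = q v) :
    List.foldl (fun acc v => if p v = true then acc + 1 else acc) (0 : Int) l
      = (l.countP q : Int) := by
  rw [PySem.List.foldl_count_if, zero_add,
      List.countP_congr (fun x hx => by rw [h x hx])]

-- characterization of Port B (unconditional)
lemma B_eq (id_list report : List String) (k : Int) :
    solution_alt id_list report k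
      = (PySem.Set.ofList id_list).map (fun u =>
          ((PySem.Set.ofList report).countP (fun v => pvRK v == u && pvHot report k v) : Int)) := by
  simp only [solution_alt, PySem.List.dedup_eq_ofList]
  apply List.map_congr_left
  intro u _
  rw [List.foldl_map, List.foldl_map]
  simp only [pvVK_def, pvRK_def]
  exact pvFoldlCount (PySem.Set.ofList report) _ _
    (fun v hv => by
      simp only [getD_foldl_insert_key, PySem.Dict.getD_empty, zero_add, pvHot, pvCnt]
      rfl)

-- ===== VERDICT (by name: the statement is the Claim_ definition above) =====
theorem solution_spec : Claim_equal_solution := by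
  intro id_list report k _ hpre
  unfold Spec_solution
  have hlen : ∀ v ∈ PySem.Set.ofList report, 2 ≤ (pvSplit v).length := by
    intro v hv
    exact (hpre v ((PySem.Set.mem_ofList report v).mp hv)).1
  have hvk : ∀ v ∈ PySem.Set.ofList report, pvVK v ∈ id_list := by
    intro v hv
    exact (hpre v ((PySem.Set.mem_ofList report v).mp hv)).2.1
  have hrk : ∀ v ∈ PySem.Set.ofList report, pvHot report k v = true → pvRK v ∈ id_list := by
    intro v hv hhot
    apply (hpre v ((PySem.Set.mem_ofList report v).mp hv)).2.2
    rw [PySem.List.dedup_eq_ofList]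
    have : ((PySem.Set.ofList report).countP
        (fun w => pvPiece (pvSplit w) 1 == pvPiece (pvSplit v) 1) : Int)
        = pvCnt report v := by
      rw [pvCnt, count_map_eq_countP]
      rfl
    rw [this]
    simpa [pvHot] using hhot
  rw [A_eq id_list report k hlen hvk hrk, B_eq id_list report k]
  apply List.map_congr_left
  intro u _
  rw [count_map_eq_countP, List.countP_filter]
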